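-- pv_equiv track=rewrite | github.com/MehdiRc/DataVisProject_Provenance | DataVis.py | excludeFilter
-- ===== SOURCE A (Python) =====
-- def excludeFilter(listOfTags, res):
--     filtered = []
--     temp = res
--     for i in range(len(listOfTags)):
--         for j in range(len(temp)):
--             if (listOfTags[i] not in temp[j]):
--                 filtered.append(temp[j])
--         temp = filtered
--         filtered = []
--     return temp
-- ===== SOURCE B (Python) =====
-- def excludeFilter(listOfTags, res):
--     return [e for e in res if all(t not in e for t in listOfTags)]
-- ===== Notes on version B (the rewrite author's own statement) =====
-- stated objective: simpler
-- what changed: Replaces the T sequential filtering passes (rebuilding the list once per tag) with one comprehension over res that keeps an element iff it contains none of the tags.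
import Mathlib
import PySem

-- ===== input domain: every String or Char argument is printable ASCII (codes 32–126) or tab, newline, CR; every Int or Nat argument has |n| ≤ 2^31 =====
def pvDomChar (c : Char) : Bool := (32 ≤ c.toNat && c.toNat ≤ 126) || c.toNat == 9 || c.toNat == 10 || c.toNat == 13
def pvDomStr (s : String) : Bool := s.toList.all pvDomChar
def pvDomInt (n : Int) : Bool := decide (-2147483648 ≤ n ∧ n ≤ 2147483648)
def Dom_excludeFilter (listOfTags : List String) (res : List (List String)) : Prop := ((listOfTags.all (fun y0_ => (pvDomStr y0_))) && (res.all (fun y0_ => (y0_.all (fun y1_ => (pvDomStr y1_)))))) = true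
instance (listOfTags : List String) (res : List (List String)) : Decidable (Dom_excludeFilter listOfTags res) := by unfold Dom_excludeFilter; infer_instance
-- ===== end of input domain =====

-- B replaces A's per-tag sequential filtering passes with a single pass keeping each
-- element iff it contains none of the tags (simpler decomposition, same result).


-- ===== PORT A =====
-- Literal transliteration of A: outer loop over range(len(listOfTags)), inner loop over
-- range(len(temp)) appending temp[j] when listOfTags[i] is not in temp[j]; then temp := filtered.
def excludeFilter (listOfTags : List String) (res : List (List String)) : List (List String) :=
  (PySem.List.pyRange 0 (listOfTags.length : Int) 1).foldl
    (fun temp i =>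
      (PySem.List.pyRange 0 (temp.length : Int) 1).foldl
        (fun filtered j =>
          if ¬ (PySem.List.pyGetD temp j []).contains (PySem.List.pyGetD listOfTags i "") then
            filtered ++ [PySem.List.pyGetD temp j []]
          else filtered)
        [])
    res

-- ===== PORT B =====
-- B: single pass, keep e iff it contains none of the tags.
def excludeFilter_alt (listOfTags : List String) (res : List (List String)) : List (List String) :=
  res.filter (fun e => listOfTags.all (fun t => ! e.contains t))

-- ===== PRECONDITION & SPEC =====
def Spec_excludeFilter (listOfTags : List String) (res : List (List String)) (out : List (List String)) : Prop := out = excludeFilter_alt listOfTags res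
instance (listOfTags : List String) (res : List (List String)) (out : List (List String)) : Decidable (Spec_excludeFilter listOfTags res out) := by unfold Spec_excludeFilter; infer_instance

-- ===== CLAIM (what is proved, stated in full; the proofs are below) =====
def Claim_equal_excludeFilter : Prop := ∀ (listOfTags : List String) (res : List (List String)), Dom_excludeFilter listOfTags res → Spec_excludeFilter listOfTags res (excludeFilter listOfTags res)

-- ===== LEMMAS AND PROOFS =====

-- Inner loop (fold over indices with pyGetD) is a filter pass.
theorem inner_eq_filter (tag : String) (temp acc : List (List String)) :
    temp.foldl
      (fun filtered e => if ¬ e.contains tag then filtered ++ [e] else filtered) acc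
    = acc ++ temp.filter (fun e => ! e.contains tag) := by
  induction temp generalizing acc with
  | nil => simp
  | cons x xs ih =>
    rw [List.foldl_cons, List.filter_cons]
    by_cases h : tag ∈ x
    · rw [if_neg (by simp [h]), ih]
      simp [h]
    · rw [if_pos (by simp [h]), ih]
      simp [h]

theorem outer_eq_filter (tags : List String) (res : List (List String)) :
    tags.foldl (fun temp tag => temp.filter (fun e => ! e.contains tag)) res
    = res.filter (fun e => tags.all (fun t => ! e.contains t)) := by
  induction tags generalizing res with
  | nil => simp
  | cons t ts ih =>
    simp only [List.foldl_cons, ih, List.filter_filter, List.all_cons]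
    exact List.filter_congr (fun e _ => by rw [Bool.and_comm])

-- ===== VERDICT (by name: the statement is the Claim_ definition above) =====
theorem excludeFilter_spec : Claim_equal_excludeFilter := by
  intro tags res _
  unfold Spec_excludeFilter excludeFilter excludeFilter_alt
  rw [← outer_eq_filter]
  rw [PySem.List.foldl_pyRange_zero_pyGetD' tags ""
    (fun temp tag =>
      (PySem.List.pyRange 0 (temp.length : Int) 1).foldl
        (fun filtered j =>
          if ¬ (PySem.List.pyGetD temp j []).contains tag then
            filtered ++ [PySem.List.pyGetD temp j []]
          else filtered) []) res]
  congr 1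
  funext temp tag
  rw [PySem.List.foldl_pyRange_zero_pyGetD' temp []
    (fun filtered e => if ¬ e.contains tag then filtered ++ [e] else filtered) []]
  simpa using inner_eq_filter tag temp []
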